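-- pv_equiv track=rewrite | github.com/hudsonc41/pythoncode | exempli/puzzlew.py | longest_rise2
-- ===== SOURCE A (Python) =====
-- def longest_rise2(stock_data):
--     longest_rise = 0
--     rise = 0
--     for i in range(1, len(stock_data)):
--         if stock_data[i] > stock_data[i - 1]:
--             rise += 1
--         else:
--             rise = 0
--         longest_rise = max(longest_rise, rise)
--     return longest_rise
-- ===== SOURCE B (Python) =====
-- def longest_rise2(stock_data):
--     # Different decomposition: build the rise/no-rise table, locate the
--     # non-rise boundary positions, and return the largest gap between
--     # consecutive boundaries (the longest all-rise stretch).
--     gt = [b > a for a, b in zip(stock_data, stock_data[1:])]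
--     bounds = [-1] + [i for i, up in enumerate(gt) if not up] + [len(gt)]
--     return max(b - a - 1 for a, b in zip(bounds, bounds[1:]))
-- ===== Notes on version B (the rewrite author's own statement) =====
-- stated objective: alternative
-- what changed: A's fused running-counter-with-max loop is replaced by a three-stage decomposition: build the rise table, list the non-rise boundary positions, and return the maximum gap between consecutive boundaries.
import Mathlib
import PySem

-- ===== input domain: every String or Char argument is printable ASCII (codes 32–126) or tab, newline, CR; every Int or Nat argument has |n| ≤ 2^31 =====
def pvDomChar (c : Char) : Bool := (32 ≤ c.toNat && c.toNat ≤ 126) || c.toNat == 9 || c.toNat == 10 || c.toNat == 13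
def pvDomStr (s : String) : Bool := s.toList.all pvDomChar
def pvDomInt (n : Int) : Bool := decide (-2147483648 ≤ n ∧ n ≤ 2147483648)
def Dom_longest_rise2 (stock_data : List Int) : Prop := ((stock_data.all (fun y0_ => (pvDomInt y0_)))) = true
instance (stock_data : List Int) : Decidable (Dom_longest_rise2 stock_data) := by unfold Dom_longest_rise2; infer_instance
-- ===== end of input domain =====

-- B replaces A's fused running-counter-with-max loop by a different decomposition:
-- rise table, non-rise boundary positions, maximum gap between consecutive boundaries
-- (objective: alternative, same cost).

-- ===== PORT A =====
-- the indices i and i-1 are always in range for i in range(1, len), so pyGetD with default 0 is exact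
def longest_rise2 (stock_data : List Int) : Int :=
  ((PySem.List.pyRange 1 (stock_data.length : Int) 1).foldl
    (fun (p : Int × Int) i =>
      let rise : Int :=
        if PySem.List.pyGetD stock_data i 0 > PySem.List.pyGetD stock_data (i - 1) 0
        then p.2 + 1 else 0
      (max p.1 rise, rise)) ((0 : Int), (0 : Int))).1

-- ===== PORT B =====
def longest_rise2_alt (stock_data : List Int) : Int :=
  let gt : List Bool :=
    (stock_data.zip (PySem.List.slice stock_data (some 1) none)).map
      (fun ab => decide (ab.2 > ab.1))
  let bounds : List Int :=
    [(-1 : Int)] ++ ((PySem.List.enumerate gt 0).filter (fun p => !p.2)).map (fun p => p.1)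
      ++ [(gt.length : Int)]
  -- bounds always has ≥ 2 elements, so Python's max over the gap generator always returns
  ((PySem.List.max?
      ((bounds.zip (PySem.List.slice bounds (some 1) none)).map (fun ab => ab.2 - ab.1 - 1))
      (fun y => y)).getD 0)

-- ===== PRECONDITION & SPEC =====
def Spec_longest_rise2 (stock_data : List Int) (out : Int) : Prop := out = longest_rise2_alt stock_data
instance (stock_data : List Int) (out : Int) : Decidable (Spec_longest_rise2 stock_data out) := by unfold Spec_longest_rise2; infer_instance

-- ===== CLAIM (what is proved, stated in full; the proofs are below) =====
def Claim_equal_longest_rise2 : Prop := ∀ (stock_data : List Int), Dom_longest_rise2 stock_data → Spec_longest_rise2 stock_data (longest_rise2 stock_data)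

-- ===== LEMMAS AND PROOFS =====

-- the rise table both programs are really about
def pvGt (xs : List Int) : List Bool := List.zipWith (fun a b => decide (a < b)) xs xs.tail

-- the loop body of A as a function of one rise bit
def pvStep (p : Int × Int) (b : Bool) : Int × Int :=
  (max p.1 (if b then p.2 + 1 else 0), if b then p.2 + 1 else 0)

-- boundary positions of a rise table
def pvFp (gt : List Bool) : List Int :=
  ((PySem.List.enumerate gt 0).filter (fun p => !p.2)).map (fun p => p.1)

-- gap list between consecutive boundaries (prev, l, end marker)
def pvGl (prev : Int) : List Int → Int → List Int
  | [], e => [e - prev - 1]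
  | p :: ps, e => (p - prev - 1) :: pvGl p ps e

-- maximum gap
def pvM (prev : Int) : List Int → Int → Int
  | [], e => e - prev - 1
  | p :: ps, e => max (p - prev - 1) (pvM p ps e)

theorem pvMapZip {α β γ : Type} (f : α → β → γ) :
    ∀ (xs : List α) (ys : List β),
      (xs.zip ys).map (fun ab => f ab.1 ab.2) = List.zipWith f xs ys := by
  intro xs
  induction xs with
  | nil => intro ys; simp
  | cons x xs ih =>
    intro ys
    cases ys with
    | nil => simp
    | cons y ys => simp [ih]

theorem pvRangeFold {β γ : Type} (h : γ → β → γ) (d : β) :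
    ∀ (zs : List β) (init : γ),
      (List.range zs.length).foldl (fun p k => h p (zs.getD k d)) init = zs.foldl h init := by
  intro zs
  induction zs using List.reverseRecOn with
  | nil => intro init; simp
  | append_singleton zs z ih =>
    intro init
    rw [List.length_append, List.length_singleton, List.range_succ, List.foldl_append,
        List.foldl_append]
    have hcongr : (List.range zs.length).foldl
        (fun p k => h p ((zs ++ [z]).getD k d)) init
        = (List.range zs.length).foldl (fun p k => h p (zs.getD k d)) init := by
      apply PySem.List.foldl_congr_mem
      intro acc k hk
      have hk' : k < zs.length := List.mem_range.mp hk
      simp [List.getD, List.getElem?_append_left hk']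
    rw [hcongr, ih]
    simp [List.getD]

-- A's index loop is the rise-table fold
theorem pvBridgeA (xs : List Int) (init : Int × Int) :
    (PySem.List.pyRange 1 (xs.length : Int) 1).foldl
      (fun (p : Int × Int) i =>
        let rise : Int :=
          if PySem.List.pyGetD xs i 0 > PySem.List.pyGetD xs (i - 1) 0
          then p.2 + 1 else 0
        (max p.1 rise, rise)) init
    = (pvGt xs).foldl pvStep init := by
  have hlen : (pvGt xs).length = xs.length - 1 := by
    simp [pvGt, List.length_zipWith, List.length_tail]
  have htn : (((xs.length : Int)) - 1).toNat = xs.length - 1 := by omega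
  rw [PySem.List.pyRange_one, htn, List.foldl_map, ← pvRangeFold pvStep false (pvGt xs) init, hlen]
  apply PySem.List.foldl_congr_mem
  intro acc k hk
  have hk' : k < xs.length - 1 := List.mem_range.mp hk
  have h1 : (1 : Int) + (k : Nat) = ((k + 1 : Nat) : Int) := by push_cast; ring
  rw [h1]
  rw [show ((k + 1 : Nat) : Int) - 1 = ((k : Nat) : Int) by push_cast; ring]
  rw [PySem.List.pyGetD_natCast, PySem.List.pyGetD_natCast]
  have hgt : (pvGt xs).getD k false = decide (xs.getD k 0 < xs.getD (k + 1) 0) := by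
    have hk1 : k < xs.length := by omega
    have hk2 : k + 1 < xs.length := by omega
    have hkz : k < (pvGt xs).length := by omega
    rw [List.getD_eq_getElem _ _ hkz, List.getD_eq_getElem _ _ hk1, List.getD_eq_getElem _ _ hk2]
    simp [pvGt, List.getElem_zipWith, List.getElem_tail]
  rw [hgt]
  by_cases h : xs.getD k 0 < xs.getD (k + 1) 0 <;> simp [pvStep]

-- the gap list as computed by B's zip
theorem pvGlZip (l : List Int) : ∀ (prev e : Int),
    (((prev :: (l ++ [e])).zip (l ++ [e])).map (fun ab => ab.2 - ab.1 - 1)) = pvGl prev l e := by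
  induction l with
  | nil => intro prev e; simp [pvGl]
  | cons p ps ih =>
    intro prev e
    simp only [List.cons_append, List.zip_cons_cons, List.map_cons, pvGl]
    rw [← ih p e]

theorem pvFoldMaxGl (ps : List Int) : ∀ (p acc e : Int),
    (pvGl p ps e).foldl max acc = max acc (pvM p ps e) := by
  induction ps with
  | nil => intro p acc e; simp [pvGl, pvM]
  | cons q qs ih =>
    intro p acc e
    simp only [pvGl, pvM, List.foldl_cons, ih]
    omega

-- Python's max over the gap list
theorem pvMaxGl (l : List Int) (prev e : Int) :
    (PySem.List.max? (pvGl prev l e) (fun y => y)).getD 0 = pvM prev l e := by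
  cases l with
  | nil => simp [pvGl, pvM, PySem.List.max?_id_cons]
  | cons p ps =>
    simp only [pvGl, pvM, PySem.List.max?_id_cons, Option.getD_some]
    rw [pvFoldMaxGl]

theorem pvM_succ (l : List Int) : ∀ (prev e : Int),
    pvM prev l (e + 1) = max (pvM prev l e) (e - l.getLastD prev) := by
  induction l with
  | nil => intro prev e; simp [pvM]; omega
  | cons p ps ih =>
    intro prev e
    simp only [pvM, ih, List.getLastD_cons]
    omega

theorem pvM_append (l : List Int) : ∀ (prev q e : Int),
    pvM prev (l ++ [q]) e = max (pvM prev l q) (e - q - 1) := by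
  induction l with
  | nil => intro prev q e; simp [pvM]
  | cons p ps ih =>
    intro prev q e
    simp only [List.cons_append, pvM, ih]
    omega

theorem pvFp_append_true (gt : List Bool) : pvFp (gt ++ [true]) = pvFp gt := by
  simp [pvFp, PySem.List.enumerate_append]

theorem pvFp_append_false (gt : List Bool) :
    pvFp (gt ++ [false]) = pvFp gt ++ [(gt.length : Int)] := by
  simp [pvFp, PySem.List.enumerate_append]

-- the loop invariant: A's pair is (maximum gap, length of the trailing run)
theorem pvInvariant (gt : List Bool) :
    gt.foldl pvStep ((0 : Int), (0 : Int))
      = (pvM (-1) (pvFp gt) (gt.length : Int),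
         (gt.length : Int) - (pvFp gt).getLastD (-1) - 1) := by
  induction gt using List.reverseRecOn with
  | nil => simp [pvFp, pvM]
  | append_singleton gt b ih =>
    cases b with
    | true =>
      rw [List.foldl_append, ih]
      simp only [List.foldl_cons, List.foldl_nil, pvStep, pvFp_append_true,
        List.length_append, List.length_singleton, if_true]
      simp only [Prod.mk.injEq]
      push_cast
      rw [pvM_succ]
      constructor <;> omega
    | false =>
      rw [List.foldl_append, ih]
      simp only [List.foldl_cons, List.foldl_nil, pvStep, pvFp_append_false,
        List.length_append, List.length_singleton]
      simp only [Prod.mk.injEq, Bool.false_eq_true, if_false]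
      push_cast
      rw [pvM_append]
      refine ⟨by omega, by simp⟩

-- B's rise table is pvGt
theorem pvGtAlt (xs : List Int) :
    (xs.zip (PySem.List.slice xs (some 1) none)).map (fun ab => decide (ab.2 > ab.1))
      = pvGt xs := by
  rw [PySem.List.slice_from_one, pvGt, ← pvMapZip]

-- ===== VERDICT (by name: the statement is the Claim_ definition above) =====
theorem longest_rise2_spec : Claim_equal_longest_rise2 := by
  intro xs _
  unfold Spec_longest_rise2 longest_rise2
  rw [pvBridgeA, pvInvariant]
  simp only [longest_rise2_alt]
  rw [pvGtAlt]
  simp only [List.cons_append]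
  rw [PySem.List.slice_from_one]
  simp only [List.tail_cons]
  rw [pvGlZip, pvMaxGl]
  rfl
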